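-- pv_equiv track=rewrite | github.com/zachabdallah/bitwise-XOR-cypher | frequencyAnalysis.py | decrypt_with_guesses
-- ===== SOURCE A (Python) =====
-- def decrypt_with_guesses(ciphertext, guesses):
--     decrypted_text = []
--     for char in ciphertext:
--         if 'a' <= char.lower() <= 'z':
--             decrypted_char = guesses.get(char.lower(), '_')
--             decrypted_text.append(decrypted_char.upper() if char.isupper() else decrypted_char)
--         else:
--             decrypted_text.append(char)
--     return ''.join(decrypted_text)
-- ===== SOURCE B (Python) =====
-- def decrypt_with_guesses(ciphertext, guesses):
--     table = {}
--     for c in "abcdefghijklmnopqrstuvwxyz":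
--         g = guesses.get(c, '_')
--         table[ord(c)] = g
--         table[ord(c.upper())] = g.upper()
--     return ciphertext.translate(table)
-- ===== Notes on version B (the rewrite author's own statement) =====
-- stated objective: faster
-- what changed: B precomputes a str.translate table keyed by character ordinal (both cases of each of the 26 letters) and decodes the ciphertext in a single translate sweep, instead of A's per-character Python loop with lower()/isupper() branching and a dict.get per character.
import Mathlib
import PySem

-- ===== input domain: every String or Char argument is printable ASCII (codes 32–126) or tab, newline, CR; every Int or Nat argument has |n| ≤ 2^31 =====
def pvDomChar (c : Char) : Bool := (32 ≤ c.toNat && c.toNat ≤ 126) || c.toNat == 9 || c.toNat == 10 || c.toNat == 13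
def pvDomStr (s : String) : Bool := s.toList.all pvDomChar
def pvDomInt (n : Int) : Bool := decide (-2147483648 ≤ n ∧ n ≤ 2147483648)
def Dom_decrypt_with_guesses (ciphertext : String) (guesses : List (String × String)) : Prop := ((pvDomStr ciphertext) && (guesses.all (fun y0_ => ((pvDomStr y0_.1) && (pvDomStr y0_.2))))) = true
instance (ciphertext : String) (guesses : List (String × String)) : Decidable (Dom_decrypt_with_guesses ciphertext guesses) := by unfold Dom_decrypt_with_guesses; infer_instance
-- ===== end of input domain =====

-- B replaces A's per-character if/else branching by a str.translate table precomputed once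
-- from the 26 lowercase letters and a single translate sweep (idiomatic; same cost class).

-- ===== PORT A =====
-- literal port of A: explicit loop, per-character branch, ''.join at the end.
-- `char` in the loop is a ONE-character string; char.lower() of one char is PySem.Chars.lowerChar,
-- and the chained comparison 'a' <= char.lower() <= 'z' of one-character strings is exactly the
-- code-point comparison of the two characters (Python str order is code-point lexicographic).
def decrypt_with_guesses (ciphertext : String) (guesses : List (String × String)) : String :=
  let decrypted_text : List String :=
    ciphertext.toList.foldl (fun acc ch =>
      let lo := PySem.Chars.lowerChar ch                     -- char.lower()
      if 'a' ≤ lo ∧ lo ≤ 'z' then                            -- 'a' <= char.lower() <= 'z'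
        let decrypted_char := (PySem.Dict.mk guesses).getD (String.mk [lo]) "_"   -- guesses.get(char.lower(), '_')
        acc ++ [if PySem.Chars.isupper ch then PySem.Str.upper decrypted_char else decrypted_char]
      else
        acc ++ [String.mk [ch]]) []
  PySem.Str.join "" decrypted_text                           -- ''.join(decrypted_text)

-- ===== PORT B =====
-- the translate table: for each lowercase letter c, table[ord(c)] = guesses.get(c,'_') and
-- table[ord(c.upper())] = guesses.get(c,'_').upper()  (c.upper() of a one-char string = upperChar)
def pvTable_decrypt (guesses : List (String × String)) : PySem.Dict Int String :=
  "abcdefghijklmnopqrstuvwxyz".toList.foldl (fun table c =>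
    let g := (PySem.Dict.mk guesses).getD (String.mk [c]) "_"
    let table := table.insert (c.toNat : Int) g
    table.insert ((PySem.Chars.upperChar c).toNat : Int) (PySem.Str.upper g))
    (PySem.Dict.mk [])

-- ciphertext.translate(table): each char whose ord is a key of the table is replaced by the
-- stored string, any other char is kept; ported by hand, exact for str-valued tables
def decrypt_with_guesses_alt (ciphertext : String) (guesses : List (String × String)) : String :=
  let table := pvTable_decrypt guesses
  PySem.Str.join ""
    (ciphertext.toList.map (fun c => (table.get? (c.toNat : Int)).getD (String.mk [c])))

-- ===== PRECONDITION & SPEC =====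
def Spec_decrypt_with_guesses (ciphertext : String) (guesses : List (String × String)) (out : String) : Prop := out = decrypt_with_guesses_alt ciphertext guesses
instance (ciphertext : String) (guesses : List (String × String)) (out : String) : Decidable (Spec_decrypt_with_guesses ciphertext guesses out) := by unfold Spec_decrypt_with_guesses; infer_instance

-- ===== CLAIM (what is proved, stated in full; the proofs are below) =====
def Claim_equal_decrypt_with_guesses : Prop := ∀ (ciphertext : String) (guesses : List (String × String)), Dom_decrypt_with_guesses ciphertext guesses → Spec_decrypt_with_guesses ciphertext guesses (decrypt_with_guesses ciphertext guesses)

-- ===== LEMMAS AND PROOFS =====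

-- the 26 lowercase letters B's loop runs over
def pvLetters : List Char := "abcdefghijklmnopqrstuvwxyz".toList

-- guesses.get(c, '_')
def pvG (guesses : List (String × String)) (c : Char) : String :=
  (PySem.Dict.mk guesses).getD (String.mk [c]) "_"

-- one iteration of B's table-building loop
def pvF (guesses : List (String × String)) (t : PySem.Dict Int String) (c : Char) :
    PySem.Dict Int String :=
  (t.insert (c.toNat : Int) (pvG guesses c)).insert
    ((PySem.Chars.upperChar c).toNat : Int) (PySem.Str.upper (pvG guesses c))

-- A's per-character contribution, as a function
def pvStepA (guesses : List (String × String)) (ch : Char) : String :=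
  let lo := PySem.Chars.lowerChar ch
  if 'a' ≤ lo ∧ lo ≤ 'z' then
    let decrypted_char := (PySem.Dict.mk guesses).getD (String.mk [lo]) "_"
    (if PySem.Chars.isupper ch then PySem.Str.upper decrypted_char else decrypted_char)
  else String.mk [ch]

lemma pvTable_eq (guesses : List (String × String)) :
    pvTable_decrypt guesses = pvLetters.foldl (pvF guesses) (PySem.Dict.mk []) := rfl

lemma pvStepA_body (guesses : List (String × String)) (acc : List String) (ch : Char) :
    (let lo := PySem.Chars.lowerChar ch
     if 'a' ≤ lo ∧ lo ≤ 'z' then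
       let decrypted_char := (PySem.Dict.mk guesses).getD (String.mk [lo]) "_"
       acc ++ [if PySem.Chars.isupper ch then PySem.Str.upper decrypted_char else decrypted_char]
     else acc ++ [String.mk [ch]]) = acc ++ [pvStepA guesses ch] := by
  simp only [pvStepA]
  split_ifs <;> rfl

lemma pv_le_iff (c d : Char) : c ≤ d ↔ c.toNat ≤ d.toNat := ge_iff_le

lemma pv_toNat_ofNat (n : Nat) (h : n < 55296) : (Char.ofNat n).toNat = n := by
  have hv : n.isValidChar := Or.inl h
  rw [Char.ofNat, dif_pos hv]
  rfl

lemma pv_char_eq_of_toNat {c d : Char} (h : c.toNat = d.toNat) : c = d := by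
  rw [← Char.ofNat_toNat c, h, Char.ofNat_toNat]

lemma pv_isupper_iff (c : Char) :
    PySem.Chars.isupper c = true ↔ (65 ≤ c.toNat ∧ c.toNat ≤ 90) := by
  simp only [PySem.Chars.isupper, Bool.and_eq_true, decide_eq_true_eq, pv_le_iff]
  rw [show ('A').toNat = 65 by decide, show ('Z').toNat = 90 by decide]

lemma pv_islower_iff (c : Char) :
    PySem.Chars.islower c = true ↔ (97 ≤ c.toNat ∧ c.toNat ≤ 122) := by
  simp only [PySem.Chars.islower, Bool.and_eq_true, decide_eq_true_eq, pv_le_iff]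
  rw [show ('a').toNat = 97 by decide, show ('z').toNat = 122 by decide]

lemma pv_isupper_false (c : Char) (h : ¬ (65 ≤ c.toNat ∧ c.toNat ≤ 90)) :
    PySem.Chars.isupper c = false := by
  cases hx : PySem.Chars.isupper c
  · rfl
  · exact absurd ((pv_isupper_iff c).1 hx) h

lemma pv_lowerChar_of_not_upper (c : Char) (h : PySem.Chars.isupper c = false) :
    PySem.Chars.lowerChar c = c := by
  simp [PySem.Chars.lowerChar, h]

lemma pv_lowerChar_toNat_of_upper (c : Char) (h : 65 ≤ c.toNat ∧ c.toNat ≤ 90) :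
    (PySem.Chars.lowerChar c).toNat = c.toNat + 32 := by
  rw [PySem.Chars.lowerChar, if_pos ((pv_isupper_iff c).2 h)]
  exact pv_toNat_ofNat _ (by omega)

lemma pv_upperChar_toNat_of_lower (c : Char) (h : 97 ≤ c.toNat ∧ c.toNat ≤ 122) :
    (PySem.Chars.upperChar c).toNat = c.toNat - 32 := by
  rw [PySem.Chars.upperChar, if_pos ((pv_islower_iff c).2 h)]
  exact pv_toNat_ofNat _ (by omega)

set_option maxRecDepth 4096 in
lemma pv_letters_lit : pvLetters = ['a','b','c','d','e','f','g','h','i','j','k','l','m','n','o','p','q','r','s','t','u','v','w','x','y','z'] := by decide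

lemma pv_letters_bounds : ∀ c ∈ pvLetters, 97 ≤ c.toNat ∧ c.toNat ≤ 122 := by
  rw [pv_letters_lit]
  intro c hc
  fin_cases hc <;> exact ⟨by decide, by decide⟩

set_option maxRecDepth 4096 in
lemma pv_letters_nodup : pvLetters.Nodup := by decide

lemma pv_mem_letters (c : Char) (h1 : 97 ≤ c.toNat) (h2 : c.toNat ≤ 122) : c ∈ pvLetters := by
  obtain ⟨n, h1, h2, rfl⟩ : ∃ n, 97 ≤ n ∧ n ≤ 122 ∧ c = Char.ofNat n :=
    ⟨c.toNat, h1, h2, (Char.ofNat_toNat c).symm⟩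
  interval_cases n <;> decide

-- the table lookup misses every key contributed by cs
lemma pv_get_foldl_of_ne (guesses : List (String × String)) (cs : List Char)
    (t : PySem.Dict Int String) (n : Int)
    (h : ∀ c ∈ cs, n ≠ (c.toNat : Int) ∧ n ≠ ((PySem.Chars.upperChar c).toNat : Int)) :
    (cs.foldl (pvF guesses) t).get? n = t.get? n := by
  induction cs generalizing t with
  | nil => rfl
  | cons c cs ih =>
    rw [List.foldl_cons, ih _ (fun c' hc' => h c' (List.mem_cons_of_mem _ hc'))]
    have hc := h c (List.mem_cons_self ..)
    rw [pvF, PySem.Dict.get?_insert_of_ne _ _ hc.2, PySem.Dict.get?_insert_of_ne _ _ hc.1]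

-- lookup at a lowercase key hits that letter's lowercase entry
lemma pv_get_foldl_low (guesses : List (String × String)) (cs : List Char)
    (t : PySem.Dict Int String) (c0 : Char) (hmem : c0 ∈ cs) (hnd : cs.Nodup)
    (hb : ∀ c ∈ cs, 97 ≤ c.toNat ∧ c.toNat ≤ 122) :
    (cs.foldl (pvF guesses) t).get? (c0.toNat : Int) = some (pvG guesses c0) := by
  induction cs generalizing t with
  | nil => cases hmem
  | cons c cs ih =>
    rw [List.foldl_cons]
    by_cases hc : c = c0
    · subst hc
      have hb0 := hb c (List.mem_cons_self ..)
      rw [pv_get_foldl_of_ne]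
      · rw [pvF, PySem.Dict.get?_insert_of_ne, PySem.Dict.get?_insert_self]
        have := pv_upperChar_toNat_of_lower c hb0
        omega
      · intro c' hc'
        have hb' := hb c' (List.mem_cons_of_mem _ hc')
        have hu := pv_upperChar_toNat_of_lower c' hb'
        constructor
        · intro heq
          exact (List.nodup_cons.1 hnd).1
            (by rwa [pv_char_eq_of_toNat (show c'.toNat = c.toNat by omega)] at hc')
        · omega
    · exact ih _ ((List.mem_cons.1 hmem).resolve_left (fun h => hc h.symm)) (List.nodup_cons.1 hnd).2
        (fun c' hc' => hb c' (List.mem_cons_of_mem _ hc'))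

-- lookup at an uppercase key hits that letter's uppercase entry
lemma pv_get_foldl_up (guesses : List (String × String)) (cs : List Char)
    (t : PySem.Dict Int String) (c0 : Char) (hmem : c0 ∈ cs) (hnd : cs.Nodup)
    (hb : ∀ c ∈ cs, 97 ≤ c.toNat ∧ c.toNat ≤ 122) :
    (cs.foldl (pvF guesses) t).get? ((PySem.Chars.upperChar c0).toNat : Int)
      = some (PySem.Str.upper (pvG guesses c0)) := by
  induction cs generalizing t with
  | nil => cases hmem
  | cons c cs ih =>
    rw [List.foldl_cons]
    by_cases hc : c = c0
    · subst hc
      have hb0 := hb c (List.mem_cons_self ..)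
      have hu0 := pv_upperChar_toNat_of_lower c hb0
      rw [pv_get_foldl_of_ne]
      · rw [pvF, PySem.Dict.get?_insert_self]
      · intro c' hc'
        have hb' := hb c' (List.mem_cons_of_mem _ hc')
        have hu' := pv_upperChar_toNat_of_lower c' hb'
        constructor
        · omega
        · intro heq
          exact (List.nodup_cons.1 hnd).1
            (by rwa [pv_char_eq_of_toNat (show c'.toNat = c.toNat by omega)] at hc')
    · exact ih _ ((List.mem_cons.1 hmem).resolve_left (fun h => hc h.symm)) (List.nodup_cons.1 hnd).2
        (fun c' hc' => hb c' (List.mem_cons_of_mem _ hc'))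

-- the heart of the equivalence: A's per-character result is exactly B's table substitution
lemma pvStep_agree (guesses : List (String × String)) (ch : Char) :
    pvStepA guesses ch
      = ((pvTable_decrypt guesses).get? (ch.toNat : Int)).getD (String.mk [ch]) := by
  rw [pvTable_eq]
  by_cases hlow : 97 ≤ ch.toNat ∧ ch.toNat ≤ 122
  · -- lowercase letter
    have hup : PySem.Chars.isupper ch = false := pv_isupper_false ch (by omega)
    have hl : PySem.Chars.lowerChar ch = ch := pv_lowerChar_of_not_upper ch hup
    rw [pv_get_foldl_low guesses pvLetters _ ch (pv_mem_letters ch hlow.1 hlow.2)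
      pv_letters_nodup pv_letters_bounds]
    simp only [pvStepA, hl, hup, Option.getD_some, Bool.false_eq_true, if_false]
    rw [if_pos ⟨(pv_le_iff _ _).2 (by rw [show ('a').toNat = 97 by decide]; omega),
                (pv_le_iff _ _).2 (by rw [show ('z').toNat = 122 by decide]; omega)⟩]
    rfl
  · by_cases hupp : 65 ≤ ch.toNat ∧ ch.toNat ≤ 90
    · -- uppercase letter: the table entry for ord(lower(ch).upper()) = ord(ch)
      have hup : PySem.Chars.isupper ch = true := (pv_isupper_iff ch).2 hupp
      have hlo := pv_lowerChar_toNat_of_upper ch hupp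
      have hmem : PySem.Chars.lowerChar ch ∈ pvLetters :=
        pv_mem_letters _ (by omega) (by omega)
      have hkey : (ch.toNat : Int) = ((PySem.Chars.upperChar (PySem.Chars.lowerChar ch)).toNat : Int) := by
        have := pv_upperChar_toNat_of_lower (PySem.Chars.lowerChar ch) (by omega)
        omega
      rw [hkey, pv_get_foldl_up guesses pvLetters _ _ hmem pv_letters_nodup pv_letters_bounds]
      simp only [pvStepA, hup, Option.getD_some, if_true]
      rw [if_pos ⟨(pv_le_iff _ _).2 (by rw [show ('a').toNat = 97 by decide]; omega),
                  (pv_le_iff _ _).2 (by rw [show ('z').toNat = 122 by decide]; omega)⟩]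
      rfl
    · -- any other character is left untouched by both programs
      have hup : PySem.Chars.isupper ch = false := pv_isupper_false ch (by omega)
      have hl : PySem.Chars.lowerChar ch = ch := pv_lowerChar_of_not_upper ch hup
      rw [pv_get_foldl_of_ne]
      · simp only [pvStepA, hl]
        rw [if_neg]
        · rfl
        · intro hcontr
          have h1 := (pv_le_iff _ _).1 hcontr.1
          have h2 := (pv_le_iff _ _).1 hcontr.2
          rw [show ('a').toNat = 97 by decide] at h1
          rw [show ('z').toNat = 122 by decide] at h2
          omega
      · intro c hc
        have hb := pv_letters_bounds c hc
        have hu := pv_upperChar_toNat_of_lower c hb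
        omega

-- ===== VERDICT =====
set_option maxRecDepth 8192 in
theorem decrypt_with_guesses_spec : Claim_equal_decrypt_with_guesses := by
  intro ct gs _
  show PySem.Str.join "" (ct.toList.foldl (fun acc ch =>
      let lo := PySem.Chars.lowerChar ch
      if 'a' ≤ lo ∧ lo ≤ 'z' then
        let decrypted_char := (PySem.Dict.mk gs).getD (String.mk [lo]) "_"
        acc ++ [if PySem.Chars.isupper ch then PySem.Str.upper decrypted_char else decrypted_char]
      else acc ++ [String.mk [ch]]) [])
    = PySem.Str.join "" (ct.toList.map (fun c =>
        ((pvTable_decrypt gs).get? ((c.toNat : Int))).getD (String.mk [c])))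
  rw [PySem.List.foldl_congr_mem ct.toList _ (fun acc ch => acc ++ [pvStepA gs ch]) []
        (fun acc x _ => pvStepA_body gs acc x),
      PySem.List.foldl_append_singleton_eq_map, List.nil_append,
      List.map_congr_left (fun ch _ => pvStep_agree gs ch)]
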